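-- pv_equiv track=rewrite | github.com/chen759281714/WIP-aware | experiments/analyze_pareto_solution.py | events_to_step_xy
-- ===== SOURCE A (Python) =====
-- from typing import Dict, Any, List, Tuple
--
-- def events_to_step_xy(events: List[Tuple[int, int, str, Any]], makespan: int):
--     """
--     将 buffer_trace 事件日志转成 step 图可直接绘制的 x/y
--     events: [(t, level, action, job), ...]
--     """
--     if not events:
--         return [0, makespan], [0, 0]
--
--     events_sorted = sorted(events, key=lambda x: x[0])
--
--     xs = []
--     ys = []
--
--     # 从第一条事件开始
--     first_t = int(events_sorted[0][0])
--     first_level = int(events_sorted[0][1])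
--
--     if first_t > 0:
--         xs.extend([0, first_t])
--         ys.extend([first_level, first_level])
--
--     for i in range(len(events_sorted) - 1):
--         t_i = int(events_sorted[i][0])
--         level_i = int(events_sorted[i][1])
--         t_j = int(events_sorted[i + 1][0])
--
--         xs.extend([t_i, t_j])
--         ys.extend([level_i, level_i])
--
--     last_t = int(events_sorted[-1][0])
--     last_level = int(events_sorted[-1][1])
--
--     if last_t < makespan:
--         xs.extend([last_t, makespan])
--         ys.extend([last_level, last_level])
--
--     if not xs:
--         xs = [0, makespan]
--         ys = [first_level, first_level]
--
--     return xs, ys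
-- ===== SOURCE B (Python) =====
-- def events_to_step_xy(events, makespan):
--     """
--     将 buffer_trace 事件日志转成 step 图可直接绘制的 x/y
--     events: [(t, level, action, job), ...]
--     """
--     if not events:
--         return [0, makespan], [0, 0]
--
--     es = sorted(events, key=lambda e: e[0])
--     first_level = int(es[0][1])
--
--     # columnar view: boundary-padded time and level sequences
--     times = [int(e[0]) for e in es]
--     levels = [int(e[1]) for e in es]
--     if times[0] > 0:
--         times.insert(0, 0)
--         levels.insert(0, first_level)
--     if times[-1] < makespan:
--         times.append(makespan)
--         levels.append(levels[-1])
--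
--     # duplicate every element, then trim the ends: no pairwise iteration needed
--     xs = [t for t in times for _ in (0, 1)][1:-1]
--     ys = [l for l in levels for _ in (0, 1)][:-2]
--
--     if not xs:
--         return [0, makespan], [first_level, first_level]
--     return xs, ys
-- ===== Notes on version B (the rewrite author's own statement) =====
-- stated objective: alternative
-- what changed: Instead of A's pairwise segment emission (leading guard, index loop over adjacent event pairs, trailing guard), B works columnar: it builds boundary-padded times and levels lists, duplicates every element, and obtains xs/ys by pure slice trimming ([1:-1] and [:-2]) with no pairwise iteration at all.
import Mathlib
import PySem

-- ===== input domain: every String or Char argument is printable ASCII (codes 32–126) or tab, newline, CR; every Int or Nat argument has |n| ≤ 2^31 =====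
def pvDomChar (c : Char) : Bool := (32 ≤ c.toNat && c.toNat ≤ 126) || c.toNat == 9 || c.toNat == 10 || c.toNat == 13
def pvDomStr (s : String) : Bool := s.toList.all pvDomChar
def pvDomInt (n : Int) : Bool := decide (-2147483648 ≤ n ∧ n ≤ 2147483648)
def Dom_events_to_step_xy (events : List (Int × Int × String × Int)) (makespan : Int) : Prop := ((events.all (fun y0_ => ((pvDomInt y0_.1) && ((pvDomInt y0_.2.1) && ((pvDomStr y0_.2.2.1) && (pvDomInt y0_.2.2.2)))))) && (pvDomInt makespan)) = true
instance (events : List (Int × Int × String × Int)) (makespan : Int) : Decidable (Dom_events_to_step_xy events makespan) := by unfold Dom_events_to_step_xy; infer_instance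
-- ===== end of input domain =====

-- B replaces A's pairwise segment emission (guard / adjacent-pair index loop / guard) by a
-- columnar construction: boundary-padded times and levels lists, every element duplicated,
-- xs/ys obtained by slice trimming ([1:-1], [:-2]) — no pairwise iteration (alternative).

-- ===== PORT A =====
-- literal transliteration of A: sort, leading guard, index loop over range(len-1), trailing guard, empty-xs fallback
def events_to_step_xy (events : List (Int × Int × String × Int)) (makespan : Int) : List Int × List Int :=
  if events = [] then ([0, makespan], [0, 0])
  else
    let d : Int × Int × String × Int := (0, 0, "", 0)
    let eventsSorted := PySem.List.sorted events (fun x => x.1) false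
    let firstT := (PySem.List.pyGetD eventsSorted 0 d).1
    let firstLevel := (PySem.List.pyGetD eventsSorted 0 d).2.1
    let xy0 : List Int × List Int :=
      if firstT > 0 then ([0, firstT], [firstLevel, firstLevel]) else ([], [])
    let xy1 := (PySem.List.pyRange 0 ((eventsSorted.length : Int) - 1) 1).foldl
      (fun st i =>
        let tI := (PySem.List.pyGetD eventsSorted i d).1
        let levelI := (PySem.List.pyGetD eventsSorted i d).2.1
        let tJ := (PySem.List.pyGetD eventsSorted (i + 1) d).1
        (st.1 ++ [tI, tJ], st.2 ++ [levelI, levelI])) xy0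
    let lastT := (PySem.List.pyGetD eventsSorted (-1) d).1
    let lastLevel := (PySem.List.pyGetD eventsSorted (-1) d).2.1
    let xy2 :=
      if lastT < makespan then (xy1.1 ++ [lastT, makespan], xy1.2 ++ [lastLevel, lastLevel]) else xy1
    if xy2.1 = [] then ([0, makespan], [firstLevel, firstLevel]) else xy2

-- ===== PORT B =====
-- literal transliteration of Source B: columnar times/levels lists padded at the boundaries,
-- each element duplicated by a flat comprehension, xs/ys cut out with slices [1:-1] / [:-2]
def events_to_step_xy_alt (events : List (Int × Int × String × Int)) (makespan : Int) : List Int × List Int :=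
  if events = [] then ([0, makespan], [0, 0])
  else
    let es := PySem.List.sorted events (fun e => e.1) false
    let firstLevel := (PySem.List.pyGetD es 0 ((0 : Int), (0 : Int), "", (0 : Int))).2.1
    let times0 := es.map (fun e => e.1)
    let levels0 := es.map (fun e => e.2.1)
    let times1 := if PySem.List.pyGetD times0 0 0 > 0 then 0 :: times0 else times0
    let levels1 := if PySem.List.pyGetD times0 0 0 > 0 then firstLevel :: levels0 else levels0
    let times := if PySem.List.pyGetD times1 (-1) 0 < makespan then times1 ++ [makespan] else times1
    let levels := if PySem.List.pyGetD times1 (-1) 0 < makespan then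
        levels1 ++ [PySem.List.pyGetD levels1 (-1) 0] else levels1
    let xs := PySem.List.slice (times.flatMap (fun t => [t, t])) (some 1) (some (-1))
    let ys := PySem.List.slice (levels.flatMap (fun l => [l, l])) none (some (-2))
    if xs = [] then ([0, makespan], [firstLevel, firstLevel]) else (xs, ys)

-- ===== PRECONDITION & SPEC =====
def Spec_events_to_step_xy (events : List (Int × Int × String × Int)) (makespan : Int) (out : List Int × List Int) : Prop := out = events_to_step_xy_alt events makespan
instance (events : List (Int × Int × String × Int)) (makespan : Int) (out : List Int × List Int) : Decidable (Spec_events_to_step_xy events makespan out) := by unfold Spec_events_to_step_xy; infer_instance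

-- ===== CLAIM (what is proved, stated in full; the proofs are below) =====
def Claim_equal_events_to_step_xy : Prop := ∀ (events : List (Int × Int × String × Int)) (makespan : Int), Dom_events_to_step_xy events makespan → Spec_events_to_step_xy events makespan (events_to_step_xy events makespan)

-- ===== LEMMAS AND PROOFS =====

-- proof-side abbreviations: the (t, level) projection and the pair-expansion of a point list
def pvProj (e : Int × Int × String × Int) : Int × Int := (e.1, e.2.1)
def pvPairsX (l : List (Int × Int)) : List Int := (l.zip l.tail).flatMap (fun pq => [pq.1.1, pq.2.1])
def pvPairsY (l : List (Int × Int)) : List Int := (l.zip l.tail).flatMap (fun pq => [pq.1.2, pq.1.2])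
def pvDup (l : List Int) : List Int := l.flatMap (fun v => [v, v])

-- both ports reduce to this common middle form: pair expansion of the boundary-padded point list
def pvStep (events : List (Int × Int × String × Int)) (makespan : Int) : List Int × List Int :=
  match PySem.List.sorted events (fun x => x.1) false with
  | [] => ([0, makespan], [0, 0])
  | p :: t =>
    let aug1 := if p.1 > 0 then (0, p.2.1) :: (p :: t).map pvProj else (p :: t).map pvProj
    let aug := if (PySem.List.pyGetD aug1 (-1) ((0 : Int), (0 : Int))).1 < makespan then
        aug1 ++ [(makespan, (PySem.List.pyGetD aug1 (-1) ((0 : Int), (0 : Int))).2)] else aug1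
    if pvPairsX aug = [] then ([0, makespan], [p.2.1, p.2.1]) else (pvPairsX aug, pvPairsY aug)

-- a fold that appends to both components of a pair is a pair of flatMaps
theorem pvFoldlPairAppend {γ : Type} (l : List γ) (f g : γ → List Int) (x0 y0 : List Int) :
    l.foldl (fun st c => (st.1 ++ f c, st.2 ++ g c)) (x0, y0)
      = (x0 ++ l.flatMap f, y0 ++ l.flatMap g) := by
  induction l generalizing x0 y0 with
  | nil => simp
  | cons c t ih => simp [ih]

-- index loop over range(len-1) reading l[k], l[k+1] = loop over zip(l, l[1:])  (Nat indices)
theorem pvRangePairsNat {α : Type} (l : List α) (d : α) (f : α → α → List Int) :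
    (List.range (l.length - 1)).flatMap (fun k => f (l.getD k d) (l.getD (k + 1) d))
      = (l.zip l.tail).flatMap (fun pq => f pq.1 pq.2) := by
  induction l with
  | nil => simp
  | cons a t ih =>
    cases t with
    | nil => simp
    | cons b r =>
      have hr : List.range ((a :: b :: r).length - 1)
          = 0 :: (List.range ((b :: r).length - 1)).map (· + 1) := by
        simp [List.range_succ_eq_map]
      rw [hr]
      simp only [List.flatMap_cons, List.flatMap_map]
      rw [show ((a :: b :: r).zip (a :: b :: r).tail)
            = (a, b) :: ((b :: r).zip (b :: r).tail) from by simp]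
      simp only [List.flatMap_cons, List.getD_cons_zero, List.getD_cons_succ]
      simp only [List.getD_cons_succ] at ih
      rw [ih]

-- the same with Python Int indices (pyRange / pyGetD)
theorem pvRangePairs {α : Type} (l : List α) (d : α) (f : α → α → List Int) :
    (PySem.List.pyRange 0 ((l.length : Int) - 1) 1).flatMap
        (fun i => f (PySem.List.pyGetD l i d) (PySem.List.pyGetD l (i + 1) d))
      = (l.zip l.tail).flatMap (fun pq => f pq.1 pq.2) := by
  rw [PySem.List.pyRange_one]
  rw [List.flatMap_map]
  rw [← pvRangePairsNat l d f]
  have hlen : (((l.length : Int) - 1 - 0)).toNat = l.length - 1 := by omega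
  rw [hlen]
  apply List.flatMap_congr
  intro k hk
  have h1 : ((0 : Int) + (k : Int)) = ((k : Nat) : Int) := by ring
  have h2 : ((k : Int) + 1) = (((k + 1 : Nat)) : Int) := by push_cast; ring
  rw [h1, h2, PySem.List.pyGetD_natCast, PySem.List.pyGetD_natCast]

-- expanding consecutive pairs: cons and append-singleton shapes
theorem pvPairsX_cons (q P : Int × Int) (T : List (Int × Int)) :
    pvPairsX (q :: P :: T) = [q.1, P.1] ++ pvPairsX (P :: T) := by
  simp [pvPairsX]

theorem pvPairsY_cons (q P : Int × Int) (T : List (Int × Int)) :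
    pvPairsY (q :: P :: T) = [q.2, q.2] ++ pvPairsY (P :: T) := by
  simp [pvPairsY]

theorem pvPairsX_append (l : List (Int × Int)) (h : l ≠ []) (x : Int × Int) :
    pvPairsX (l ++ [x]) = pvPairsX l ++ [(l.getLast h).1, x.1] := by
  induction l with
  | nil => simp at h
  | cons a t ih =>
    cases t with
    | nil => simp [pvPairsX]
    | cons b r =>
      have h2 : (b :: r) ≠ [] := by simp
      have key := ih h2
      simp only [List.cons_append] at key ⊢
      rw [pvPairsX_cons a b (r ++ [x]), key, pvPairsX_cons a b r]
      simp [List.getLast_cons]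

theorem pvPairsY_append (l : List (Int × Int)) (h : l ≠ []) (x : Int × Int) :
    pvPairsY (l ++ [x]) = pvPairsY l ++ [(l.getLast h).2, (l.getLast h).2] := by
  induction l with
  | nil => simp at h
  | cons a t ih =>
    cases t with
    | nil => simp [pvPairsY]
    | cons b r =>
      have h2 : (b :: r) ≠ [] := by simp
      have key := ih h2
      simp only [List.cons_append] at key ⊢
      rw [pvPairsY_cons a b (r ++ [x]), key, pvPairsY_cons a b r]
      simp [List.getLast_cons]

-- A's middle loop over the raw events equals the pair expansion of the projected list
theorem pvMiddleX (s : List (Int × Int × String × Int)) :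
    (s.zip s.tail).flatMap (fun pq => [pq.1.1, pq.2.1]) = pvPairsX (s.map pvProj) := by
  induction s with
  | nil => simp [pvPairsX]
  | cons a t ih =>
    cases t with
    | nil => simp [pvPairsX]
    | cons b r =>
      simp only [List.tail_cons] at ih
      simp only [List.map_cons, List.tail_cons, List.zip_cons_cons, List.flatMap_cons,
        pvPairsX] at ih ⊢
      rw [ih]
      simp [pvProj]

theorem pvMiddleY (s : List (Int × Int × String × Int)) :
    (s.zip s.tail).flatMap (fun pq => [pq.1.2.1, pq.1.2.1]) = pvPairsY (s.map pvProj) := by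
  induction s with
  | nil => simp [pvPairsY]
  | cons a t ih =>
    cases t with
    | nil => simp [pvPairsY]
    | cons b r =>
      simp only [List.tail_cons] at ih
      simp only [List.map_cons, List.tail_cons, List.zip_cons_cons, List.flatMap_cons,
        pvPairsY] at ih ⊢
      rw [ih]
      simp [pvProj]

theorem pvProj_fst (e : Int × Int × String × Int) : (pvProj e).1 = e.1 := rfl
theorem pvProj_snd (e : Int × Int × String × Int) : (pvProj e).2 = e.2.1 := rfl

theorem pvGetLastMap (l : List (Int × Int × String × Int)) (h : l ≠ []) (h2 : l.map pvProj ≠ []) :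
    (l.map pvProj).getLast h2 = pvProj (l.getLast h) := by
  apply Option.some.inj
  rw [← List.getLast?_eq_some_getLast h2, List.getLast?_map, List.getLast?_eq_some_getLast h]
  rfl

theorem pvLast_map_cons (p : Int × Int × String × Int) (t : List (Int × Int × String × Int)) :
    PySem.List.pyGetD (pvProj p :: t.map pvProj) (-1) ((0 : Int), (0 : Int))
      = pvProj (PySem.List.pyGetD (p :: t) (-1) ((0 : Int), (0 : Int), "", (0 : Int))) := by
  rw [PySem.List.pyGetD_neg_one _ _ (by simp), PySem.List.pyGetD_neg_one _ _ (by simp)]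
  exact pvGetLastMap (p :: t) (by simp) (by simp)

theorem pvLast_cons_cons_map (q : Int × Int) (p : Int × Int × String × Int)
    (t : List (Int × Int × String × Int)) :
    PySem.List.pyGetD (q :: pvProj p :: t.map pvProj) (-1) ((0 : Int), (0 : Int))
      = pvProj (PySem.List.pyGetD (p :: t) (-1) ((0 : Int), (0 : Int), "", (0 : Int))) := by
  rw [PySem.List.pyGetD_neg_one _ _ (by simp), List.getLast_cons (by simp)]
  rw [PySem.List.pyGetD_neg_one _ _ (by simp)]
  exact pvGetLastMap (p :: t) (by simp) (by simp)

theorem pvPairsX_append' (l : List (Int × Int)) (h : l ≠ []) (x : Int × Int) :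
    pvPairsX (l ++ [x]) = pvPairsX l ++ [(PySem.List.pyGetD l (-1) ((0 : Int), (0 : Int))).1, x.1] := by
  rw [PySem.List.pyGetD_neg_one _ _ h]
  exact pvPairsX_append l h x

theorem pvPairsY_append' (l : List (Int × Int)) (h : l ≠ []) (x : Int × Int) :
    pvPairsY (l ++ [x]) = pvPairsY l
      ++ [(PySem.List.pyGetD l (-1) ((0 : Int), (0 : Int))).2,
          (PySem.List.pyGetD l (-1) ((0 : Int), (0 : Int))).2] := by
  rw [PySem.List.pyGetD_neg_one _ _ h]
  exact pvPairsY_append l h x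

-- A equals the common middle form
theorem pvA_eq_step (events : List (Int × Int × String × Int)) (makespan : Int) :
    events_to_step_xy events makespan = pvStep events makespan := by
  by_cases hev : events = []
  · simp [events_to_step_xy, pvStep, hev, PySem.List.sorted]
  · have hsne : PySem.List.sorted events (fun x : Int × Int × String × Int => x.1) false ≠ [] := by
      simp [PySem.List.sorted_eq_nil_iff, hev]
    obtain ⟨p, t, hpt⟩ := List.exists_cons_of_ne_nil hsne
    simp only [events_to_step_xy, pvStep, if_neg hev, hpt, PySem.List.pyGetD_zero_cons]
    by_cases hft : p.1 > 0
    · simp only [if_pos hft]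
      simp only [pvFoldlPairAppend]
      rw [pvRangePairs (p :: t) ((0 : Int), (0 : Int), "", (0 : Int)) (fun e1 e2 => [e1.1, e2.1]),
          pvRangePairs (p :: t) ((0 : Int), (0 : Int), "", (0 : Int)) (fun e1 e2 => [e1.2.1, e1.2.1]),
          pvMiddleX, pvMiddleY]
      simp only [List.map_cons, pvLast_cons_cons_map, pvProj_fst, pvProj_snd]
      by_cases hlt : (PySem.List.pyGetD (p :: t) (-1) ((0 : Int), (0 : Int), "", (0 : Int))).1 < makespan
      · simp only [if_pos hlt]
        rw [pvPairsX_append' ((0, p.2.1) :: pvProj p :: List.map pvProj t) (by simp),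
            pvPairsY_append' ((0, p.2.1) :: pvProj p :: List.map pvProj t) (by simp)]
        simp only [pvLast_cons_cons_map, pvProj_fst, pvProj_snd, pvPairsX_cons, pvPairsY_cons]
      · simp only [if_neg hlt]
        simp only [pvPairsX_cons, pvPairsY_cons, pvProj_fst]
    · simp only [if_neg hft]
      simp only [pvFoldlPairAppend]
      rw [pvRangePairs (p :: t) ((0 : Int), (0 : Int), "", (0 : Int)) (fun e1 e2 => [e1.1, e2.1]),
          pvRangePairs (p :: t) ((0 : Int), (0 : Int), "", (0 : Int)) (fun e1 e2 => [e1.2.1, e1.2.1]),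
          pvMiddleX, pvMiddleY]
      simp only [List.map_cons, pvLast_map_cons, pvProj_fst, pvProj_snd]
      by_cases hlt : (PySem.List.pyGetD (p :: t) (-1) ((0 : Int), (0 : Int), "", (0 : Int))).1 < makespan
      · simp only [if_pos hlt]
        rw [pvPairsX_append' (pvProj p :: List.map pvProj t) (by simp),
            pvPairsY_append' (pvProj p :: List.map pvProj t) (by simp)]
        simp only [pvLast_map_cons, pvProj_fst, pvProj_snd]
        simp
      · simp only [if_neg hlt]
        simp

-- dup-and-trim equals pair expansion: xs side
theorem pvDupTrimX (l : List (Int × Int)) :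
    ((pvDup (l.map Prod.fst)).drop 1).dropLast = pvPairsX l := by
  induction l with
  | nil => simp [pvDup, pvPairsX]
  | cons a t ih =>
    cases t with
    | nil => simp [pvDup, pvPairsX]
    | cons b r =>
      rw [pvPairsX_cons]
      rw [← ih]
      simp only [List.map_cons, pvDup, List.flatMap_cons, List.cons_append, List.drop_succ_cons,
        List.drop_zero, List.nil_append]
      rw [show (a.1 :: b.1 :: b.1 :: List.flatMap (fun v => [v, v]) (r.map Prod.fst))
            = [a.1, b.1] ++ (b.1 :: List.flatMap (fun v => [v, v]) (r.map Prod.fst)) from rfl]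
      rw [List.dropLast_append_of_ne_nil]
      · simp
      · simp

-- dup-and-take equals pair expansion: ys side
theorem pvDupTrimY (l : List (Int × Int)) :
    (pvDup (l.map Prod.snd)).take (2 * l.length - 2) = pvPairsY l := by
  induction l with
  | nil => simp [pvDup, pvPairsY]
  | cons a t ih =>
    cases t with
    | nil => simp [pvDup, pvPairsY]
    | cons b r =>
      rw [pvPairsY_cons, ← ih]
      simp only [List.map_cons, pvDup, List.flatMap_cons, List.cons_append, List.length_cons]
      have h1 : 2 * (r.length + 1 + 1) - 2 = (2 * (r.length + 1) - 2) + 1 + 1 := by omega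
      rw [h1]
      simp [List.take_succ_cons]

-- slice l [1:-1] = tail-then-dropLast
theorem pvSliceMid (l : List Int) :
    PySem.List.slice l (some 1) (some (-1)) = (l.drop 1).dropLast := by
  have h1 : (1 : Int) = ((1 : Nat) : Int) := rfl
  cases l with
  | nil => simp [PySem.List.slice]
  | cons a t =>
    simp [PySem.List.slice, PySem.List.clampIdx]
    rw [List.dropLast_eq_take]
    congr 1

theorem pvLenDup (l : List Int) : (pvDup l).length = 2 * l.length := by
  induction l with
  | nil => simp [pvDup]
  | cons a t ih => simp [pvDup] at ih ⊢; omega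

-- B equals the common middle form
theorem pvB_eq_step (events : List (Int × Int × String × Int)) (makespan : Int) :
    events_to_step_xy_alt events makespan = pvStep events makespan := by
  by_cases hev : events = []
  · simp [events_to_step_xy_alt, pvStep, hev, PySem.List.sorted]
  · have hsne : PySem.List.sorted events (fun x : Int × Int × String × Int => x.1) false ≠ [] := by
      simp [PySem.List.sorted_eq_nil_iff, hev]
    obtain ⟨p, t, hpt⟩ := List.exists_cons_of_ne_nil hsne
    have hmapfst : ∀ (s : List (Int × Int × String × Int)),
        s.map (fun e => e.1) = (s.map pvProj).map Prod.fst := by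
      intro s; rw [List.map_map]; rfl
    have hmapsnd : ∀ (s : List (Int × Int × String × Int)),
        s.map (fun e => e.2.1) = (s.map pvProj).map Prod.snd := by
      intro s; rw [List.map_map]; rfl
    simp only [events_to_step_xy_alt, pvStep, if_neg hev, hpt, PySem.List.pyGetD_zero_cons,
      List.map_cons]
    -- name the augmented point list of pvStep
    set aug1 := (if p.1 > 0 then (0, p.2.1) :: pvProj p :: t.map pvProj
                 else pvProj p :: t.map pvProj) with haug1
    have haug1ne : aug1 ≠ [] := by
      rw [haug1]; split_ifs <;> simp
    -- B's times1/levels1 are the columns of aug1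
    have htimes1 : (if p.1 > 0 then (0 : Int) :: p.1 :: t.map (fun e => e.1)
                    else p.1 :: t.map (fun e => e.1)) = aug1.map Prod.fst := by
      rw [haug1]; split_ifs <;> simp [hmapfst, pvProj]
    have hlevels1 : (if p.1 > 0 then p.2.1 :: p.2.1 :: t.map (fun e => e.2.1)
                     else p.2.1 :: t.map (fun e => e.2.1)) = aug1.map Prod.snd := by
      rw [haug1]; split_ifs <;> simp [hmapsnd, pvProj]
    -- last of a column = column of the last
    have hlastfst : PySem.List.pyGetD (aug1.map Prod.fst) (-1) 0
        = (PySem.List.pyGetD aug1 (-1) ((0 : Int), (0 : Int))).1 := by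
      rw [PySem.List.pyGetD_neg_one _ _ (by simp [haug1ne]),
          PySem.List.pyGetD_neg_one _ _ haug1ne]
      apply Option.some.inj
      rw [← List.getLast?_eq_some_getLast, List.getLast?_map,
          List.getLast?_eq_some_getLast haug1ne]
      rfl
    have hlastsnd : PySem.List.pyGetD (aug1.map Prod.snd) (-1) 0
        = (PySem.List.pyGetD aug1 (-1) ((0 : Int), (0 : Int))).2 := by
      rw [PySem.List.pyGetD_neg_one _ _ (by simp [haug1ne]),
          PySem.List.pyGetD_neg_one _ _ haug1ne]
      apply Option.some.inj
      rw [← List.getLast?_eq_some_getLast, List.getLast?_map,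
          List.getLast?_eq_some_getLast haug1ne]
      rfl
    rw [show (if p.1 > 0 then (0 : Int) :: p.1 :: t.map (fun e => e.1)
              else p.1 :: t.map (fun e => e.1)) = aug1.map Prod.fst from htimes1] at *
    rw [show (if p.1 > 0 then p.2.1 :: p.2.1 :: t.map (fun e => e.2.1)
              else p.2.1 :: t.map (fun e => e.2.1)) = aug1.map Prod.snd from hlevels1]
    rw [hlastfst, hlastsnd]
    set aug := (if (PySem.List.pyGetD aug1 (-1) ((0 : Int), (0 : Int))).1 < makespan then
        aug1 ++ [(makespan, (PySem.List.pyGetD aug1 (-1) ((0 : Int), (0 : Int))).2)] else aug1)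
      with haug
    have htimes : (if (PySem.List.pyGetD aug1 (-1) ((0 : Int), (0 : Int))).1 < makespan then
          aug1.map Prod.fst ++ [makespan] else aug1.map Prod.fst) = aug.map Prod.fst := by
      rw [haug]; split_ifs <;> simp
    have hlevels : (if (PySem.List.pyGetD aug1 (-1) ((0 : Int), (0 : Int))).1 < makespan then
          aug1.map Prod.snd ++ [(PySem.List.pyGetD aug1 (-1) ((0 : Int), (0 : Int))).2]
          else aug1.map Prod.snd) = aug.map Prod.snd := by
      rw [haug]; split_ifs <;> simp
    rw [htimes, hlevels]
    -- slices reduce to the pair expansions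
    have hxs : PySem.List.slice ((aug.map Prod.fst).flatMap (fun v => [v, v])) (some 1) (some (-1))
        = pvPairsX aug := by
      rw [show (aug.map Prod.fst).flatMap (fun v => [v, v]) = pvDup (aug.map Prod.fst) from rfl,
          pvSliceMid, pvDupTrimX]
    have hys : PySem.List.slice ((aug.map Prod.snd).flatMap (fun v => [v, v])) none (some (-2))
        = pvPairsY aug := by
      rw [show (aug.map Prod.snd).flatMap (fun v => [v, v]) = pvDup (aug.map Prod.snd) from rfl,
          PySem.List.slice_to_neg_ofNat _ 2 (by omega), pvLenDup]
      simp only [List.length_map]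
      exact pvDupTrimY aug
    rw [hxs, hys]

-- ===== VERDICT (by name: the statement is the Claim_ definition above) =====
theorem events_to_step_xy_spec : Claim_equal_events_to_step_xy := by
  intro events makespan _
  show events_to_step_xy events makespan = events_to_step_xy_alt events makespan
  rw [pvA_eq_step, pvB_eq_step]
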